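-- pv_equiv track=rewrite | github.com/LeoQUENETTE/aide_a_la_decision | main.py | generateAlphabet
-- ===== SOURCE A (Python) =====
-- def generateAlphabet(n: int) -> list[str]:
--     alphabet = 'abcdefghijklmnopqrstuvwxyz'
--     result = []
--
--     length = 1
--     while len(result) < n:
--         from itertools import product
--         combinations = product(alphabet, repeat=length)
--
--         for combo in combinations:
--             if len(result) >= n:
--                 break
--             result.append(''.join(combo))
--
--         length += 1
--
--     return result
-- ===== SOURCE B (Python) =====
-- def generateAlphabet(n: int) -> list[str]:
--     alphabet = 'abcdefghijklmnopqrstuvwxyz'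
--     result = []
--     for i in range(1, n + 1):
--         j = i
--         s = ''
--         while j:
--             j, r = divmod(j - 1, 26)
--             s = alphabet[r] + s
--         result.append(s)
--     return result
-- ===== Notes on version B (the rewrite author's own statement) =====
-- stated objective: alternative
-- what changed: Replaces A's length-by-length itertools.product enumeration (generate-and-collect until n strings) with a direct per-index bijective base-26 conversion: for each i in 1..n the column string is computed arithmetically via j, r = divmod(j-1, 26).
import Mathlib
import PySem

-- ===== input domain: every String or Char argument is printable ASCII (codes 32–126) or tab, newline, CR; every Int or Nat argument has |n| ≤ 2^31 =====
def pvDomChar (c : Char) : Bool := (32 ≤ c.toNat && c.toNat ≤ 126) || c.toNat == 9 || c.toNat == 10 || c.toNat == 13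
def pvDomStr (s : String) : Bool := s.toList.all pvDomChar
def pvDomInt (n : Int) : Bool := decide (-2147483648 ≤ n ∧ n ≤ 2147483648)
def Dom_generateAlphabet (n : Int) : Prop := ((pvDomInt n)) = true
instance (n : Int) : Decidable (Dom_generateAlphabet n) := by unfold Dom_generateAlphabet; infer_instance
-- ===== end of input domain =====

-- B replaces A's length-by-length itertools.product enumeration with a direct
-- per-index bijective base-26 conversion (alternative decomposition, same output).

-- ===== PORT A =====
def pvAlphabet : List Char := "abcdefghijklmnopqrstuvwxyz".toList

-- itertools.product(alphabet, repeat=length): all tuples in lexicographic order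
def pvProdRep : Nat → List (List Char)
  | 0 => [[]]
  | L + 1 => pvAlphabet.flatMap (fun c => (pvProdRep L).map (fun w => c :: w))

-- the inner `for combo in combinations: if len(result) >= n: break; result.append(...)`
def pvInnerFor (n : Int) (result : List String) : List (List Char) → List String
  | [] => result
  | c :: cs =>
    if n ≤ (result.length : Int) then result
    else pvInnerFor n (result ++ [String.mk c]) cs

-- the outer `while len(result) < n` loop; fuel only makes it total: each pass with the
-- condition true appends at least one string, so fuel = n.toNat iterations suffice.
def pvGenLoop (n : Int) : Nat → List String → Nat → List String
  | 0, result, _ => result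
  | fuel + 1, result, len =>
    if (result.length : Int) < n then
      pvGenLoop n fuel (pvInnerFor n result (pvProdRep len)) (len + 1)
    else result

def generateAlphabet (n : Int) : List String := pvGenLoop n n.toNat [] 1

-- ===== PORT B =====
-- the inner `while j: j, r = divmod(j - 1, 26); s = alphabet[r] + s`
-- (alphabet[r] with r = j % 26 < 26, so getD is exact)
def pvToCol : Nat → List Char
  | 0 => []
  | j + 1 => pvToCol (j / 26) ++ [pvAlphabet.getD (j % 26) 'a']
decreasing_by exact Nat.lt_succ_of_le (Nat.div_le_self j 26)

def generateAlphabet_alt (n : Int) : List String :=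
  (PySem.List.pyRange 1 (n + 1) 1).map (fun i => String.mk (pvToCol i.toNat))

-- ===== PRECONDITION & SPEC =====
def Spec_generateAlphabet (n : Int) (out : List String) : Prop := out = generateAlphabet_alt n
instance (n : Int) (out : List String) : Decidable (Spec_generateAlphabet n out) := by unfold Spec_generateAlphabet; infer_instance

-- ===== CLAIM (what is proved, stated in full; the proofs are below) =====
def Claim_equal_generateAlphabet : Prop := ∀ (n : Int), Dom_generateAlphabet n → Spec_generateAlphabet n (generateAlphabet n)

-- ===== LEMMAS AND PROOFS =====

theorem pvAlphabet_eq : pvAlphabet = (List.range 26).map (fun r => Char.ofNat (97 + r)) := by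
  decide

theorem pvAlphabet_getD (r : Nat) (h : r < 26) :
    pvAlphabet.getD r 'a' = Char.ofNat (97 + r) := by
  revert h; revert r; decide

-- number of strings of length < L, plus one: pvBase L is the index of the first length-L string
def pvBase : Nat → Nat
  | 0 => 0
  | L + 1 => 26 * pvBase L + 1

theorem pvBase_geom (L : Nat) : 25 * pvBase L + 1 = 26 ^ L := by
  induction L with
  | zero => simp [pvBase]
  | succ L ih => simp only [pvBase, pow_succ]; omega

theorem pvToCol_step (j r : Nat) (hr : r < 26) :
    pvToCol (26 * j + r + 1) = pvToCol j ++ [Char.ofNat (97 + r)] := by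
  rw [pvToCol]
  rw [Nat.mul_add_div (by omega), Nat.mul_add_mod]
  rw [Nat.div_eq_of_lt hr, Nat.mod_eq_of_lt hr, pvAlphabet_getD r hr]
  simp

theorem pvProdRep_snoc (L : Nat) :
    pvProdRep (L + 1) = (pvProdRep L).flatMap (fun w => pvAlphabet.map (fun c => w ++ [c])) := by
  induction L with
  | zero =>
    simp only [pvProdRep, List.flatMap_cons, List.flatMap_nil, List.map_nil, List.append_nil]
    exact List.map_eq_flatMap.symm
  | succ L ih =>
    conv_lhs => rw [pvProdRep, ih]
    rw [pvProdRep]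
    simp only [List.map_flatMap, List.flatMap_map, List.map_map, List.flatMap_assoc,
      Function.comp_def]
    simp only [List.cons_append]

theorem pvRange'_mul (m a : Nat) :
    List.range' (26 * a + 1) (26 * m) =
      (List.range' a m).flatMap (fun j => (List.range 26).map (fun r => 26 * j + r + 1)) := by
  induction m generalizing a with
  | zero => simp
  | succ m ih =>
    have h1 : 26 * (m + 1) = 26 + 26 * m := by ring
    rw [h1, ← List.range'_append_1]
    conv_rhs => rw [List.range'_succ, List.flatMap_cons]
    have h2 : 26 * a + 1 + 26 = 26 * (a + 1) + 1 := by ring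
    rw [h2, ih (a + 1)]
    congr 1

theorem pvTake_range' (s m t : Nat) :
    (List.range' s m).take t = List.range' s (min t m) := by
  rw [List.range'_eq_map_range, List.range'_eq_map_range, ← List.map_take, List.take_range]

theorem pvProdRep_eq (L : Nat) :
    pvProdRep L = (List.range' (pvBase L) (26 ^ L)).map pvToCol := by
  induction L with
  | zero => simp [pvProdRep, pvBase, pvToCol]
  | succ L ih =>
    rw [pvProdRep_snoc, ih, pvAlphabet_eq]
    have hbase : pvBase (L + 1) = 26 * pvBase L + 1 := rfl
    have hpow : (26 : Nat) ^ (L + 1) = 26 * 26 ^ L := by ring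
    rw [hbase, hpow, pvRange'_mul]
    rw [List.flatMap_map, List.map_flatMap]
    apply List.flatMap_congr
    intro j _
    rw [List.map_map, List.map_map]
    apply List.map_congr_left
    intro r hr
    simp only [Function.comp]
    rw [pvToCol_step j r (List.mem_range.mp hr)]

theorem pvInnerFor_eq (n : Int) (l : List (List Char)) : ∀ result : List String,
    pvInnerFor n result l = result ++ (l.take (n.toNat - result.length)).map (fun c => String.mk c) := by
  induction l with
  | nil => intro result; simp [pvInnerFor]
  | cons c cs ih =>
    intro result
    rw [pvInnerFor]
    split
    · have : n.toNat - result.length = 0 := by omega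
      simp [this]
    · have h : n.toNat - result.length = (n.toNat - (result.length + 1)) + 1 := by omega
      rw [ih (result ++ [String.mk c]), h, List.take_succ_cons]
      simp

theorem pvGenLoop_eq (n : Int) : ∀ (fuel L k : Nat),
    k = min n.toNat (pvBase L - 1) → 1 ≤ L → n.toNat ≤ fuel + k →
    pvGenLoop n fuel ((List.range' 1 k).map (fun j => String.mk (pvToCol j))) L =
      (List.range' 1 n.toNat).map (fun j => String.mk (pvToCol j)) := by
  intro fuel
  induction fuel with
  | zero =>
    intro L k hk _ hfuel
    have : k = n.toNat := by omega
    rw [pvGenLoop, this]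
  | succ fuel ih =>
    intro L k hk hL hfuel
    rw [pvGenLoop]
    have hlen : ((List.range' 1 k).map (fun j => String.mk (pvToCol j))).length = k := by simp
    split
    · rename_i hcond
      rw [hlen] at hcond
      have hkn : k < n.toNat := by omega
      have hbase1 : 1 ≤ pvBase L := by
        cases L with
        | zero => omega
        | succ L => simp only [pvBase]; omega
      have hkb : k = pvBase L - 1 := by omega
      have hpow1 : 1 ≤ 26 ^ L := Nat.one_le_pow _ _ (by omega)
      have hstep : pvInnerFor n ((List.range' 1 k).map (fun j => String.mk (pvToCol j))) (pvProdRep L)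
          = (List.range' 1 (min n.toNat (pvBase (L+1) - 1))).map (fun j => String.mk (pvToCol j)) := by
        rw [pvInnerFor_eq, hlen, pvProdRep_eq, ← List.map_take, pvTake_range']
        have hb : pvBase L = k + 1 := by omega
        rw [hb, List.map_map]
        have hcomp : ((fun c => String.mk c) ∘ pvToCol) = (fun j => String.mk (pvToCol j)) := rfl
        rw [hcomp, ← List.map_append]
        have hb2 : pvBase (L + 1) - 1 = k + 26 ^ L := by
          have := pvBase_geom L
          simp only [pvBase]; omega
        have hmin : k + min (n.toNat - k) (26 ^ L) = min n.toNat (pvBase (L+1) - 1) := by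
          rw [hb2]; omega
        rw [show k + 1 = 1 + k from by omega, List.range'_append_1, hmin]
      rw [hstep]
      apply ih (L + 1) _ rfl (by omega)
      have hb2 : pvBase (L + 1) - 1 = k + 26 ^ L := by
        have := pvBase_geom L
        simp only [pvBase]; omega
      omega
    · rename_i hcond
      rw [hlen] at hcond
      have : k = n.toNat := by omega
      rw [this]

theorem generateAlphabet_alt_eq (n : Int) :
    generateAlphabet_alt n = (List.range' 1 n.toNat).map (fun j => String.mk (pvToCol j)) := by
  unfold generateAlphabet_alt
  rw [PySem.List.pyRange_one]
  have h1 : (n + 1 - 1).toNat = n.toNat := by omega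
  rw [h1, List.range'_eq_map_range, List.map_map, List.map_map]
  apply List.map_congr_left
  intro k _
  simp only [Function.comp]
  have h2 : ((1 : Int) + (k : Int)).toNat = 1 + k := by omega
  rw [h2]

-- ===== VERDICT (by name: the statement is the Claim_ definition above) =====
theorem generateAlphabet_spec : Claim_equal_generateAlphabet := by
  intro n _
  unfold Spec_generateAlphabet generateAlphabet
  rw [generateAlphabet_alt_eq]
  have h := pvGenLoop_eq n n.toNat 1 0 (by simp [pvBase]) (by omega) (by omega)
  simpa using h
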